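-- pv_equiv track=rewrite | github.com/d-najd/tetris-ai | AIFields.py | calBigHole
-- ===== SOURCE A (Python) =====
-- import math
--
-- def calBigHole(board):
--     # TODO check if this works correctly
--     score = 0
--     lastHitPos = -1
--     for x in range(0, len(board[0])):
--         for y in range(0, len(board)):
--             if board[y][x] != 0:
--                 if lastHitPos != -1:
--                     if math.fabs(lastHitPos - y) > 3:
--                         score -= 1
--                     lastHitPos = y
--                     break
--                 else:
--                     lastHitPos = y
--                     break
--     return score
-- ===== SOURCE B (Python) =====
-- def calBigHole(board):
--     width = len(board[0])
--     top = {}  # column -> first filled row, found by one row-major sweep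
--     for y, row in enumerate(board):
--         for x in range(width):
--             if x not in top and row[x] != 0:
--                 top[x] = y
--     score = 0
--     prev = None
--     for x in range(width):
--         if x in top:
--             if prev is not None and abs(prev - top[x]) > 3:
--                 score -= 1
--             prev = top[x]
--     return score
-- ===== Notes on version B (the rewrite author's own statement) =====
-- stated objective: alternative
-- what changed: Replaces A's column-major nested scan with early break by a single row-major sweep that fills a dict of first-hit rows per column (the per-column inner scan disappears), followed by a separate pass over columns counting adjacent jumps > 3.
import Mathlib
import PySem

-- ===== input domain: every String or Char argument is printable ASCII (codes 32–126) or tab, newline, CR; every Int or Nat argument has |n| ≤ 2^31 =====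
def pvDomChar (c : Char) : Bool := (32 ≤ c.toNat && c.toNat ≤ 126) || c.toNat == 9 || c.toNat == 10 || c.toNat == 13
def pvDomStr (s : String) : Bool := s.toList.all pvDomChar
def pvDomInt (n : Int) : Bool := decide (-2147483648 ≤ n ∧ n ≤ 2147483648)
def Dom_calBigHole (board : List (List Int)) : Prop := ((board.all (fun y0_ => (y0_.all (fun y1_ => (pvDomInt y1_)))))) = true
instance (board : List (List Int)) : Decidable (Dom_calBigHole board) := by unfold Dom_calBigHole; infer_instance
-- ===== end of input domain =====

-- B replaces A's column-major nested scan (early break) by one row-major sweep filling a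
-- first-hit dict per column, then a separate column pass counting jumps > 3; objective: alternative.

-- ===== PORT A =====
-- board[y][x]; defaults are only reached outside Pre_calBigHole (where Python raises)
def pvCell (board : List (List Int)) (x y : Int) : Int :=
  PySem.List.pyGetD (PySem.List.pyGetD board y []) x 0

-- inner 'for y' loop of A, with break; state = (score, lastHitPos)
def calBigHoleInner (board : List (List Int)) (x : Int) : List Int → Int × Int → Int × Int
  | [], st => st
  | y :: ys, (score, lastHitPos) =>
    if pvCell board x y != 0 then
      if lastHitPos ≠ -1 then
        (if |lastHitPos - y| > 3 then score - 1 else score, y)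
      else (score, y)
    else calBigHoleInner board x ys (score, lastHitPos)

def calBigHole (board : List (List Int)) : Int :=
  ((PySem.List.pyRange 0 ((PySem.List.pyGetD board 0 []).length : Int) 1).foldl
    (fun st x => calBigHoleInner board x (PySem.List.pyRange 0 (board.length : Int) 1) st)
    (0, -1)).1

-- ===== PORT B =====
-- 'for y, row in enumerate(board)': row-major sweep filling the first-hit dict
def calBigHoleSweep (width : Int) : List (List Int) → Int → PySem.Dict Int Int → PySem.Dict Int Int
  | [], _, top => top
  | row :: rest, y, top =>
    calBigHoleSweep width rest (y + 1)
      ((PySem.List.pyRange 0 width 1).foldl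
        (fun top x =>
          if !(top.contains x) && (PySem.List.pyGetD row x 0 != 0) then top.insert x y else top)
        top)

-- second 'for x' loop: prev is None ↔ the Option is none
def calBigHoleCount (top : PySem.Dict Int Int) : List Int → Option Int → Int → Int
  | [], _, score => score
  | x :: xs, prev, score =>
    match top.get? x with
    | some t =>
      calBigHoleCount top xs (some t)
        (match prev with
         | some p => if |p - t| > 3 then score - 1 else score
         | none => score)
    | none => calBigHoleCount top xs prev score

def calBigHole_alt (board : List (List Int)) : Int :=
  let width : Int := ((PySem.List.pyGetD board 0 []).length : Int)
  let top := calBigHoleSweep width board 0 PySem.Dict.empty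
  calBigHoleCount top (PySem.List.pyRange 0 width 1) none 0

-- ===== PRECONDITION & SPEC =====
-- Pre_ is exactly where Python A returns: board nonempty, and every cell A's scan reaches exists
-- (each row i is long enough at column x unless an earlier row already holds that column's first hit);
-- A raises IndexError on the complement, and B raises there too.
def Pre_calBigHole (board : List (List Int)) : Prop :=
  board ≠ [] ∧ ∀ i < board.length, ∀ x < board.headI.length,
    x < (board.getD i []).length ∨
      ∃ j < i, x < (board.getD j []).length ∧ (board.getD j []).getD x 0 ≠ 0
instance (board : List (List Int)) : Decidable (Pre_calBigHole board) := by
  unfold Pre_calBigHole; infer_instance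
def pvWitness_calBigHole : List (List Int) := [[1, 0], [0, 5]]

def Spec_calBigHole (board : List (List Int)) (out : Int) : Prop := out = calBigHole_alt board
instance (board : List (List Int)) (out : Int) : Decidable (Spec_calBigHole board out) := by
  unfold Spec_calBigHole; infer_instance

-- ===== CLAIM (what is proved, stated in full; the proofs are below) =====
def Claim_equal_calBigHole : Prop := ∀ (board : List (List Int)), Dom_calBigHole board → Pre_calBigHole board → Spec_calBigHole board (calBigHole board)

-- ===== LEMMAS AND PROOFS =====

-- first filled row of column x, rows indexed from k (spec of both programs' "top of column")
def pvFirstHit (x : Int) : List (List Int) → Int → Option Int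
  | [], _ => none
  | row :: rest, y => if PySem.List.pyGetD row x 0 != 0 then some y else pvFirstHit x rest (y + 1)

def pvTops (board : List (List Int)) (xs : List Int) : List Int :=
  xs.filterMap (fun x => pvFirstHit x board 0)

def pvStep : Int × Int → Int → Int × Int :=
  fun st y =>
    if st.2 ≠ -1 then (if |st.2 - y| > 3 then st.1 - 1 else st.1, y) else (st.1, y)

-- jump count seeded with lastHitPos l (A's sentinel form)
def pvJ : Int → List Int → Int
  | _, [] => 0
  | l, t :: ts => (if l ≠ -1 ∧ |l - t| > 3 then 1 else 0) + pvJ t ts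

-- jump count seeded with Option prev (B's form)
def pvJO : Option Int → List Int → Int
  | _, [] => 0
  | none, t :: ts => pvJO (some t) ts
  | some p, t :: ts => (if |p - t| > 3 then 1 else 0) + pvJO (some t) ts

theorem pvInner_eq_find (board : List (List Int)) (x : Int) (ys : List Int) (s l : Int) :
    calBigHoleInner board x ys (s, l) =
      match ys.find? (fun y => pvCell board x y != 0) with
      | none => (s, l)
      | some y => pvStep (s, l) y := by
  induction ys with
  | nil => simp [calBigHoleInner, List.find?_nil]
  | cons y ys ih =>
    by_cases h : (pvCell board x y != 0) = true
    · rw [List.find?_cons_of_pos (p := fun y => pvCell board x y != 0) h]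
      simp only [calBigHoleInner]
      rw [if_pos h]
      simp [pvStep]
    · rw [List.find?_cons_of_neg (p := fun y => pvCell board x y != 0) h]
      simp only [calBigHoleInner]
      rw [if_neg h]
      exact ih

-- A's inner find? over row indices IS pvFirstHit
theorem pvFind_eq_firstHit (board : List (List Int)) (x : Int) :
    ∀ (rest : List (List Int)) (k : Nat), board.drop k = rest →
      (PySem.List.pyRange (k : Int) (board.length : Int) 1).find?
          (fun y => pvCell board x y != 0) = pvFirstHit x rest (k : Int) := by
  intro rest
  induction rest with
  | nil =>
    intro k hk
    have hlen : board.length ≤ k := List.drop_eq_nil_iff.mp hk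
    have : PySem.List.pyRange (k : Int) (board.length : Int) 1 = [] := by
      simp [PySem.List.pyRange]; omega
    simp [this, pvFirstHit]
  | cons row rest ih =>
    intro k hk
    have hklt : k < board.length := by
      by_contra h
      rw [List.drop_eq_nil_of_le (by omega)] at hk; simp at hk
    have hrow : board[k]? = some row := by
      have h0 : (board.drop k)[0]? = some row := by rw [hk]; rfl
      simpa using h0
    have hcell : pvCell board x (k : Int) = PySem.List.pyGetD row x 0 := by
      have : PySem.List.pyGetD board (k : Int) [] = row := by
        rw [PySem.List.pyGetD_natCast]
        simp [List.getD, hrow]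
      simp [pvCell, this]
    rw [PySem.List.pyRange_one_cons (by exact_mod_cast hklt)]
    by_cases h : (PySem.List.pyGetD row x 0 != 0) = true
    · rw [List.find?_cons_of_pos (by simpa [hcell] using h)]
      simp [pvFirstHit, h]
    · rw [List.find?_cons_of_neg (by simpa [hcell] using h)]
      have hdrop : board.drop (k + 1) = rest := by
        have := congrArg List.tail hk
        simpa [List.tail_drop] using this
      have := ih (k + 1) hdrop
      push_cast at this ⊢
      rw [this]
      simp [pvFirstHit, h]

theorem pvFoldA_eq (board : List (List Int)) (xs : List Int) (st : Int × Int) :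
    xs.foldl (fun st x =>
        calBigHoleInner board x (PySem.List.pyRange 0 (board.length : Int) 1) st) st
      = (pvTops board xs).foldl pvStep st := by
  induction xs generalizing st with
  | nil => simp [pvTops]
  | cons x xs ih =>
    obtain ⟨s, l⟩ := st
    rw [List.foldl_cons, pvInner_eq_find]
    have hfh := pvFind_eq_firstHit board x board 0 (by simp)
    simp only [Nat.cast_zero] at hfh
    cases h : pvFirstHit x board 0 with
    | none => rw [hfh, h]; simp [pvTops, h, ih]
    | some y => rw [hfh, h]; simp [pvTops, h, ih]

theorem pvFoldStep_fst (ts : List Int) (s l : Int) :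
    (ts.foldl pvStep (s, l)).1 = s - pvJ l ts := by
  induction ts generalizing s l with
  | nil => simp [pvJ]
  | cons t ts ih =>
    rw [List.foldl_cons]
    have hstep : pvStep (s, l) t = ((if l ≠ -1 ∧ |l - t| > 3 then s - 1 else s), t) := by
      simp only [pvStep]
      by_cases h1 : l ≠ -1
      · by_cases h2 : |l - t| > 3
        · simp [h1, h2]
        · simp [h1, h2]
      · simp [h1]
    rw [hstep, ih, pvJ]
    by_cases h : l ≠ -1 ∧ |l - t| > 3
    · simp [h]; ring
    · simp [h]

theorem pvJ_eq_pvJO (ts : List Int) (l : Int) (hl : 0 ≤ l) (hts : ∀ t ∈ ts, 0 ≤ t) :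
    pvJ l ts = pvJO (some l) ts := by
  induction ts generalizing l with
  | nil => simp [pvJ, pvJO]
  | cons t ts ih =>
    have hl' : l ≠ -1 := by omega
    rw [pvJ, pvJO, ih t (hts t (by simp)) (fun u hu => hts u (by simp [hu]))]
    by_cases h : |l - t| > 3 <;> simp [h, hl']

theorem pvJ_neg_one (ts : List Int) (hts : ∀ t ∈ ts, 0 ≤ t) :
    pvJ (-1) ts = pvJO none ts := by
  cases ts with
  | nil => simp [pvJ, pvJO]
  | cons t ts' =>
    have h1 : pvJ (-1) (t :: ts') = pvJ t ts' := by simp [pvJ]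
    rw [h1, pvJO, pvJ_eq_pvJO ts' t (hts t List.mem_cons_self)
      (fun u hu => hts u (List.mem_cons_of_mem t hu))]

theorem pvTops_nonneg (board : List (List Int)) (xs : List Int) :
    ∀ t ∈ pvTops board xs, 0 ≤ t := by
  intro t ht
  rw [pvTops, List.mem_filterMap] at ht
  obtain ⟨x, -, hx⟩ := ht
  suffices h : ∀ (rest : List (List Int)) (k : Int), 0 ≤ k →
      pvFirstHit x rest k = some t → 0 ≤ t by
    exact h board 0 le_rfl hx
  intro rest
  induction rest with
  | nil => intro k _ h; simp [pvFirstHit] at h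
  | cons row rest ih =>
    intro k hk h
    by_cases hc : (PySem.List.pyGetD row x 0 != 0) = true
    · simp [pvFirstHit, hc] at h; omega
    · simp [pvFirstHit, hc] at h
      exact ih (k + 1) (by omega) h

-- one row's inner fold over the columns: effect on get?
theorem pvFoldIns_get (row : List Int) (y : Int) (xs : List Int) (d : PySem.Dict Int Int)
    (x : Int) :
    (xs.foldl (fun top x' =>
        if !(top.contains x') && (PySem.List.pyGetD row x' 0 != 0) then top.insert x' y else top)
      d).get? x
    = if x ∈ xs ∧ d.get? x = none ∧ PySem.List.pyGetD row x 0 ≠ 0 then some y else d.get? x := by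
  induction xs generalizing d with
  | nil => simp
  | cons x' xs ih =>
    rw [List.foldl_cons]
    by_cases hx : x' = x
    · subst hx
      by_cases hn : d.get? x' = none
      · by_cases hc : PySem.List.pyGetD row x' 0 = 0
        · have hd' : (if (!d.contains x' && (PySem.List.pyGetD row x' 0 != 0)) = true
              then d.insert x' y else d) = d := by
            rw [if_neg]; simp [hc]
          rw [hd', ih]
          simp [hc]
        · have hcontains : d.contains x' = false := by
            rw [PySem.Dict.contains_eq_isSome_get?, hn]; rfl
          have hd' : (if (!d.contains x' && (PySem.List.pyGetD row x' 0 != 0)) = true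
              then d.insert x' y else d) = d.insert x' y := by
            rw [if_pos]; simp [hcontains, hc]
          rw [hd', ih]
          simp [PySem.Dict.get?_insert_self, hn, hc]
      · have hcontains : d.contains x' = true := by
          rw [PySem.Dict.contains_eq_isSome_get?]
          cases h : d.get? x' with
          | none => exact absurd h hn
          | some v => rfl
        have hd' : (if (!d.contains x' && (PySem.List.pyGetD row x' 0 != 0)) = true
            then d.insert x' y else d) = d := by
          rw [if_neg]; simp [hcontains]
        rw [hd', ih]
        simp [hn]
    · have hstep : (if (!(d.contains x') && (PySem.List.pyGetD row x' 0 != 0)) = true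
          then d.insert x' y else d).get? x = d.get? x := by
        split_ifs with h
        · exact PySem.Dict.get?_insert_of_ne d y (fun he => hx he.symm)
        · rfl
      rw [ih]
      rw [hstep]
      have hx' : ¬ x = x' := fun he => hx he.symm
      simp [List.mem_cons, hx']

-- the whole row sweep computes pvFirstHit per column inside the range
theorem pvSweep_get (width : Int) (rows : List (List Int)) (y0 : Int)
    (d : PySem.Dict Int Int) (x : Int) (hx : x ∈ PySem.List.pyRange 0 width 1) :
    (calBigHoleSweep width rows y0 d).get? x = (d.get? x).or (pvFirstHit x rows y0) := by
  induction rows generalizing y0 d with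
  | nil => simp [calBigHoleSweep, pvFirstHit]
  | cons row rest ih =>
    rw [calBigHoleSweep, ih]
    rw [pvFoldIns_get]
    cases h : d.get? x with
    | some v => simp
    | none =>
      by_cases hc : PySem.List.pyGetD row x 0 ≠ 0
      · simp [hx, hc, pvFirstHit]
      · simp only [ne_eq, not_not] at hc
        simp [hc, pvFirstHit]

-- B's second loop counts jumps over the dict's hits
theorem pvCount_eq (top : PySem.Dict Int Int) (xs : List Int) (prev : Option Int) (score : Int) :
    calBigHoleCount top xs prev score = score - pvJO prev (xs.filterMap top.get?) := by
  induction xs generalizing prev score with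
  | nil => simp [calBigHoleCount, pvJO]
  | cons x xs ih =>
    rw [calBigHoleCount]
    cases h : top.get? x with
    | none => simp [h, ih]
    | some t =>
      simp only [h, List.filterMap_cons, ih]
      cases prev with
      | none => simp [pvJO]
      | some p =>
        rw [pvJO]
        by_cases hgt : |p - t| > 3
        · simp [hgt]; ring
        · simp [hgt]

-- ===== VERDICT (by name: the statement is the Claim_ definition above) =====
theorem calBigHole_spec : Claim_equal_calBigHole := by
  intro board _ _
  unfold Spec_calBigHole calBigHole calBigHole_alt
  dsimp only
  rw [pvFoldA_eq, pvFoldStep_fst, pvCount_eq]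
  have htops : (PySem.List.pyRange 0 ((PySem.List.pyGetD board 0 []).length : Int) 1).filterMap
      (calBigHoleSweep ((PySem.List.pyGetD board 0 []).length : Int) board 0 PySem.Dict.empty).get?
      = pvTops board (PySem.List.pyRange 0 ((PySem.List.pyGetD board 0 []).length : Int) 1) := by
    apply List.filterMap_congr
    intro x hx
    rw [pvSweep_get _ board 0 PySem.Dict.empty x hx]
    simp [PySem.Dict.get?_empty]
  rw [htops, pvJ_neg_one _ (pvTops_nonneg board _)]
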